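-- pv_equiv track=rewrite | github.com/mathieu-lemay/aoc_2018 | 12.py | fix_array
-- ===== SOURCE A (Python) =====
-- def fix_array(offset, arr):
--     if "#" not in arr:
--         return offset, arr
--
--     # Fix start
--     s = 0
--     for i in range(len(arr)):
--         if arr[i] == "#":
--             s = i
--             break
--
--     if s < 3:
--         x = 3 - s
--         offset -= x
--         arr = ["."] * x + arr
--     elif s > 3:
--         x = s - 3
--         offset += x
--         arr = arr[x:]
--
--     # Fix end
--     s = 0
--     for i in range(len(arr)):
--         if arr[-(i + 1)] == "#":
--             s = i
--             break
--
--     if s < 3: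
--         x = 3 - s
--         arr = arr + ["."] * x
--     elif s > 3:
--         x = s - 3
--         arr = arr[:-x]
--
--     return offset, arr
-- ===== SOURCE B (Python) =====
-- def fix_front(offset, arr):
--     # Normalize the front by single-cell rewriting: pad one dot at a time while a
--     # '#' sits within the first three cells, then shave one cell at a time until
--     # the cell at index 3 is the first '#'.
--     arr = list(arr)
--     while "#" in arr[:3]:
--         arr.insert(0, ".")
--         offset -= 1
--     while arr[3] != "#":
--         del arr[0]
--         offset += 1
--     return offset, arr
--
--
-- def fix_array(offset, arr):
--     if "#" not in arr:
--         return offset, arr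
--     offset, arr = fix_front(offset, arr)
--     _, arr = fix_front(0, arr[::-1])
--     return offset, arr[::-1]
-- ===== Notes on version B (the rewrite author's own statement) =====
-- stated objective: alternative
-- what changed: B replaces A's computed-index conditional pad/trim blocks with a single-cell fixpoint rewriter fix_front (prepend a dot while '#' is within the first three cells, then delete head cells until index 3 holds the first '#'), applied once to the list and once to its reverse.
import Mathlib
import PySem

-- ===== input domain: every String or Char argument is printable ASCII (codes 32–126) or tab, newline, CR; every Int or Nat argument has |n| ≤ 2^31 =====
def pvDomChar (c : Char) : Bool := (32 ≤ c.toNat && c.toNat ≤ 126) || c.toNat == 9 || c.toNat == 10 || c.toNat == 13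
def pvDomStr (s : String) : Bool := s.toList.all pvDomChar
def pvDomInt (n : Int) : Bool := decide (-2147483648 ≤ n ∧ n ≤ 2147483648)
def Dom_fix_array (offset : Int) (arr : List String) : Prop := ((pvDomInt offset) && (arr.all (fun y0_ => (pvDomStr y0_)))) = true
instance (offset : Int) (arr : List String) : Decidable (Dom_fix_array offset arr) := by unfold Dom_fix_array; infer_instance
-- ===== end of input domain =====

-- B normalizes by single-cell fixpoint rewriting (one front-normalizer applied to the list and to its reverse) instead of A's computed-index conditional pad/trim blocks (objective: alternative).

-- ===== PORT A =====
-- 'for i in range(len(arr)): if arr[i] == "#": s = i; break' with s initialised to 0: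
-- a scan returning the index of the first "#", none if absent (then s keeps its default 0 via getD).
def faScan (l : List String) (i : Nat) : Option Nat :=
  match l with
  | [] => none
  | a :: tl => if a = "#" then some i else faScan tl (i + 1)

def fix_array (offset : Int) (arr : List String) : Int × List String :=
  if "#" ∉ arr then (offset, arr)
  else
    -- Fix start
    let s := (faScan arr 0).getD 0
    let offset := if s < 3 then offset - ((3 - s : Nat) : Int)
                  else if s > 3 then offset + ((s - 3 : Nat) : Int) else offset
    let arr := if s < 3 then List.replicate (3 - s) "." ++ arr
               else if s > 3 then arr.drop (s - 3)   -- arr[x:], 0 ≤ x < len: exact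
               else arr
    -- Fix end: arr[-(i+1)] scans from the back, i.e. scans arr.reverse front to back
    let s2 := (faScan arr.reverse 0).getD 0
    let arr := if s2 < 3 then arr ++ List.replicate (3 - s2) "."
               else if s2 > 3 then arr.take (arr.length - (s2 - 3))   -- arr[:-x], 0 < x ≤ len: exact
               else arr
    (offset, arr)

-- ===== PORT B =====
-- termination helper for padF: the first-'#' index grows under the prepend
theorem pvIdxOf_lt_of_mem_take {a : String} : ∀ (n : Nat) (l : List String), a ∈ l.take n → l.idxOf a < n := by
  intro n l
  induction l generalizing n with
  | nil => simp
  | cons x tl ih =>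
    cases n with
    | zero => simp
    | succ m =>
      intro h
      by_cases hx : x = a
      · simp [hx]
      · have hmem : a ∈ tl.take m := by
          rcases List.mem_cons.mp (by simpa using h) with h1 | h1
          · exact absurd h1.symm hx
          · exact h1
        have := ih m hmem
        simp [hx]
        omega

-- termination helper for trimF: arr[3] exists forces length > 3
theorem pvGet3_len {l : List String} (h : ¬ (PySem.List.pyGet? l 3).getD "#" = "#") : 3 < l.length := by
  cases e : PySem.List.pyGet? l 3 with
  | none => rw [e] at h; simp at h
  | some x =>
    have e2 : l[(3 : Nat)]? = some x := by
      rw [← PySem.List.pyGet?_natCast (xs := l) (n := (3 : Nat))]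
      exact_mod_cast e
    exact (List.getElem?_eq_some_iff.mp e2).1

-- 'while "#" in arr[:3]: arr.insert(0, "."); offset -= 1'
def padF (offset : Int) (arr : List String) : Int × List String :=
  if h : "#" ∈ arr.take 3 then padF (offset - 1) ("." :: arr) else (offset, arr)
termination_by 3 - arr.idxOf "#"
decreasing_by
  have h1 := pvIdxOf_lt_of_mem_take 3 arr h
  have h2 : ("." :: arr).idxOf "#" = arr.idxOf "#" + 1 := by
    simp
  omega

-- 'while arr[3] != "#": del arr[0]; offset += 1'  — in every reachable state arr[3] is in
-- range (the pad loop left the first '#' at index ≥ 3), so the getD default is never taken.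
def trimF (offset : Int) (arr : List String) : Int × List String :=
  if h : ¬ (PySem.List.pyGet? arr 3).getD "#" = "#" then trimF (offset + 1) (arr.drop 1) else (offset, arr)
termination_by arr.length
decreasing_by
  have := pvGet3_len h
  simp
  omega

def fixFront (offset : Int) (arr : List String) : Int × List String :=
  let (o, a) := padF offset arr
  trimF o a

def fix_array_alt (offset : Int) (arr : List String) : Int × List String :=
  if "#" ∉ arr then (offset, arr)
  else
    let (o, a) := fixFront offset arr
    let (_, a2) := fixFront 0 a.reverse
    (o, a2.reverse)

-- ===== PRECONDITION & SPEC =====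
def Spec_fix_array (offset : Int) (arr : List String) (out : Int × List String) : Prop := out = fix_array_alt offset arr
instance (offset : Int) (arr : List String) (out : Int × List String) : Decidable (Spec_fix_array offset arr out) := by unfold Spec_fix_array; infer_instance

-- ===== CLAIM (what is proved, stated in full; the proofs are below) =====
def Claim_equal_fix_array : Prop := ∀ (offset : Int) (arr : List String), Dom_fix_array offset arr → Spec_fix_array offset arr (fix_array offset arr)

-- ===== LEMMAS AND PROOFS =====

theorem faScan_first {p r : List String} (hp : "#" ∉ p) (i : Nat) :
    faScan (p ++ "#" :: r) i = some (i + p.length) := by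
  induction p generalizing i with
  | nil => simp [faScan]
  | cons a tl ih =>
    have ha : ¬ a = "#" := fun e => hp (e ▸ List.mem_cons_self)
    have := ih (fun hm => hp (List.mem_cons_of_mem _ hm)) (i + 1)
    simp [faScan, ha, this]
    omega

theorem exists_first_hash {l : List String} (h : "#" ∈ l) :
    ∃ p r, l = p ++ "#" :: r ∧ "#" ∉ p := by
  induction l with
  | nil => simp at h
  | cons a tl ih =>
    by_cases ha : a = "#"
    · exact ⟨[], tl, by simp [ha], by simp⟩
    · have htl : "#" ∈ tl := by
        rcases List.mem_cons.mp h with h1 | h1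
        · exact absurd h1.symm ha
        · exact h1
      obtain ⟨p, r, hpr, hp⟩ := ih htl
      refine ⟨a :: p, r, by simp [hpr], ?_⟩
      intro hm
      rcases List.mem_cons.mp hm with h1 | h1
      · exact ha h1.symm
      · exact hp h1

theorem first_hash_unique : ∀ {q1 : List String} {w1 : List String} {q2 w2 : List String},
    "#" ∉ q1 → "#" ∉ q2 → q1 ++ "#" :: w1 = q2 ++ "#" :: w2 → q1 = q2 ∧ w1 = w2 := by
  intro q1
  induction q1 with
  | nil =>
    intro w1 q2 w2 _ hq2 he
    cases q2 with
    | nil => simpa using he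
    | cons b tb =>
      exfalso
      have : b = "#" := by simpa [eq_comm] using (congrArg (List.head? ·) he)
      exact hq2 (this ▸ List.mem_cons_self)
  | cons a ta ih =>
    intro w1 q2 w2 hq1 hq2 he
    cases q2 with
    | nil =>
      exfalso
      have : a = "#" := by simpa [eq_comm] using (congrArg (List.head? ·) he)
      exact hq1 (this ▸ List.mem_cons_self)
    | cons b tb =>
      have h1 : a = b ∧ ta ++ "#" :: w1 = tb ++ "#" :: w2 := by simpa using he
      have := ih (fun hm => hq1 (List.mem_cons_of_mem _ hm)) (fun hm => hq2 (List.mem_cons_of_mem _ hm)) h1.2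
      exact ⟨by simp [h1.1, this.1], this.2⟩

-- padF on a first-hash decomposition
theorem padF_eq : ∀ (k : Nat) (p : List String), "#" ∉ p → 3 - p.length = k →
    ∀ (offset : Int) (r : List String),
    padF offset (p ++ "#" :: r) = (offset - k, List.replicate k "." ++ p ++ "#" :: r) := by
  intro k
  induction k with
  | zero =>
    intro p hp hlen offset r
    have h3 : 3 ≤ p.length := by omega
    rw [padF, dif_neg]
    · simp
    · rw [List.take_append_of_le_length h3]
      intro hmem
      exact hp (List.mem_of_mem_take hmem)
  | succ k ih =>
    intro p hp hlen offset r
    have hlt : p.length < 3 := by omega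
    have hmem : "#" ∈ (p ++ "#" :: r).take 3 := by
      rw [List.take_append]
      refine List.mem_append_right _ ?_
      have : 0 < 3 - p.length := by omega
      cases e : 3 - p.length with
      | zero => omega
      | succ m => simp
    have hp' : "#" ∉ ("." :: p) := by
      intro hm
      rcases List.mem_cons.mp hm with h1 | h1
      · exact absurd h1 (by decide)
      · exact hp h1
    rw [padF, dif_pos hmem]
    have := ih ("." :: p) hp' (by simp; omega) (offset - 1) r
    rw [show ("." :: (p ++ "#" :: r)) = ("." :: p) ++ "#" :: r from rfl, this]
    refine Prod.ext ?_ ?_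
    · push_cast; ring
    · simp [List.replicate_succ']

-- trimF on a first-hash decomposition with prefix length ≥ 3
theorem trimF_eq : ∀ (k : Nat) (p : List String), "#" ∉ p → p.length = 3 + k →
    ∀ (offset : Int) (r : List String),
    trimF offset (p ++ "#" :: r) = (offset + k, p.drop k ++ "#" :: r) := by
  intro k
  induction k with
  | zero =>
    intro p hp hlen offset r
    have hget : PySem.List.pyGet? (p ++ "#" :: r) 3 = some "#" := by
      rw [show (3 : Int) = ((3 : Nat) : Int) from rfl, PySem.List.pyGet?_natCast,
        List.getElem?_append_right (by omega), hlen]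
      simp
    rw [trimF, dif_neg]
    · simp
    · rw [hget]; simp
  | succ k ih =>
    intro p hp hlen offset r
    have h3 : 3 < p.length := by omega
    have hget : PySem.List.pyGet? (p ++ "#" :: r) 3 = some p[3] := by
      rw [show (3 : Int) = ((3 : Nat) : Int) from rfl, PySem.List.pyGet?_natCast,
        List.getElem?_append_left h3, List.getElem?_eq_getElem h3]
    have hne : ¬ p[3] = "#" := fun e => hp (e ▸ List.getElem_mem h3)
    rw [trimF, dif_pos]
    · have hdrop : (p ++ "#" :: r).drop 1 = p.drop 1 ++ "#" :: r :=
        List.drop_append_of_le_length (by omega)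
      have hp' : "#" ∉ p.drop 1 := fun hm => hp (List.mem_of_mem_drop hm)
      rw [hdrop, ih (p.drop 1) hp' (by simp; omega) (offset + 1) r]
      refine Prod.ext ?_ ?_
      · push_cast; ring
      · rw [List.drop_drop, Nat.add_comm]
    · rw [hget]
      simpa using hne

theorem fixFront_eq {p : List String} (hp : "#" ∉ p) (offset : Int) (r : List String) :
    fixFront offset (p ++ "#" :: r) =
      (offset + (p.length : Int) - 3,
       List.replicate (3 - p.length) "." ++ p.drop (p.length - 3) ++ "#" :: r) := by
  have hP : "#" ∉ (List.replicate (3 - p.length) "." ++ p) := by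
    intro hm
    rcases List.mem_append.mp hm with h1 | h1
    · exact absurd (List.eq_of_mem_replicate h1) (by decide)
    · exact hp h1
  have hPlen : (List.replicate (3 - p.length) "." ++ p).length = 3 + (p.length - 3) := by
    simp; omega
  rw [fixFront, padF_eq (3 - p.length) p hp rfl offset r]
  show trimF (offset - ((3 - p.length : Nat) : Int))
      (List.replicate (3 - p.length) "." ++ p ++ "#" :: r) = _
  rw [trimF_eq (p.length - 3) _ hP hPlen _ r]
  refine Prod.ext ?_ ?_
  · simp; omega
  · simp only []
    by_cases hf : p.length ≤ 3
    · have e1 : p.length - 3 = 0 := by omega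
      simp [e1]
    · have e1 : 3 - p.length = 0 := by omega
      simp [e1]

-- if X = p ++ "#"::r has last-hash tail decomposition q (via its reverse), then so does
-- P2 ++ "#"::r for any hash-free P2 (the suffix after the last '#' lives inside "#"::r)
theorem reverse_decomp_transfer {p r q w : List String} (_hp : "#" ∉ p) (hq : "#" ∉ q)
    (harr : (p ++ "#" :: r).reverse = q ++ "#" :: w) (P2 : List String) :
    ∃ w2, (P2 ++ "#" :: r).reverse = q ++ "#" :: w2 := by
  have hrev : ∀ (P : List String), (P ++ "#" :: r).reverse = r.reverse ++ "#" :: P.reverse := by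
    intro P; simp
  by_cases hr : "#" ∈ r.reverse
  · obtain ⟨q', w', hq'r, hq'⟩ := exists_first_hash hr
    have h1 : (p ++ "#" :: r).reverse = q' ++ "#" :: (w' ++ "#" :: p.reverse) := by
      rw [hrev, hq'r]; simp
    obtain ⟨hqq, -⟩ := first_hash_unique hq' hq (h1.symm.trans harr)
    refine ⟨w' ++ "#" :: P2.reverse, ?_⟩
    rw [hrev, hq'r, ← hqq]; simp
  · have h1 : (p ++ "#" :: r).reverse = r.reverse ++ "#" :: p.reverse := hrev p
    obtain ⟨hqq, -⟩ := first_hash_unique hr hq (h1.symm.trans harr)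
    refine ⟨P2.reverse, ?_⟩
    rw [hrev, ← hqq]

theorem fix_array_spec_aux (offset : Int) (arr : List String) :
    fix_array offset arr = fix_array_alt offset arr := by
  by_cases h : "#" ∈ arr
  · obtain ⟨p, r, hpr, hp⟩ := exists_first_hash h
    obtain ⟨q, w, hqw, hq⟩ := exists_first_hash (List.mem_reverse.mpr h)
    have hPre : "#" ∉ (List.replicate (3 - p.length) "." ++ p.drop (p.length - 3)) := by
      intro hm
      rcases List.mem_append.mp hm with h1 | h1
      · exact absurd (List.eq_of_mem_replicate h1) (by decide)
      · exact hp (List.mem_of_mem_drop h1)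
    obtain ⟨w2, hw2⟩ := reverse_decomp_transfer hp hq (by rw [← hpr]; exact hqw)
      (List.replicate (3 - p.length) "." ++ p.drop (p.length - 3))
    -- the common post-front-fix list, and its two decompositions
    have ha1 : (List.replicate (3 - p.length) "." ++ p.drop (p.length - 3)) ++ "#" :: r
        = w2.reverse ++ "#" :: q.reverse := by
      have := congrArg List.reverse hw2
      simpa using this
    -- B side, closed form
    have hB : fix_array_alt offset arr =
        (offset + (p.length : Int) - 3,
         w2.reverse ++ "#" :: ((q.drop (q.length - 3)).reverse ++ List.replicate (3 - q.length) ".")) := by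
      rw [fix_array_alt, if_neg (by simpa using h), hpr]
      simp only [fixFront_eq hp]
      rw [show List.replicate (3 - p.length) "." ++ p.drop (p.length - 3) ++ "#" :: r
          = (List.replicate (3 - p.length) "." ++ p.drop (p.length - 3)) ++ "#" :: r from by
        simp [List.append_assoc]]
      rw [hw2]
      simp only [fixFront_eq hq]
      simp [List.append_assoc]
    rw [hB, fix_array, if_neg (by simpa using h)]
    have hs1 : faScan arr 0 = some p.length := by
      rw [hpr]; simpa using faScan_first hp 0
    have hs2 : faScan ((List.replicate (3 - p.length) "." ++ p.drop (p.length - 3)) ++ "#" :: r).reverse 0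
        = some q.length := by
      rw [hw2]; simpa using faScan_first hq 0
    simp only [hs1, Option.getD_some]
    -- shared back-fix computation, on the common list in its last-'#' decomposition
    have hstage : ∀ o1 o2 : Int, o1 = o2 →
        (o1, if q.length < 3 then (w2.reverse ++ "#" :: q.reverse) ++ List.replicate (3 - q.length) "."
             else if q.length > 3 then
               (w2.reverse ++ "#" :: q.reverse).take ((w2.reverse ++ "#" :: q.reverse).length - (q.length - 3))
             else w2.reverse ++ "#" :: q.reverse)
          = (o2, w2.reverse ++ "#" :: ((q.drop (q.length - 3)).reverse ++ List.replicate (3 - q.length) ".")) := by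
      intro o1 o2 ho
      rcases Nat.lt_trichotomy q.length 3 with htc | htc | htc
      · have e : q.length - 3 = 0 := by omega
        simp [if_pos htc, e, ho]
      · have e1 : q.length - 3 = 0 := by omega
        have e2 : 3 - q.length = 0 := by omega
        rw [if_neg (by omega), if_neg (by omega), ho]
        simp [e1, e2]
      · have e2 : 3 - q.length = 0 := by omega
        rw [if_neg (by omega), if_pos (by omega : q.length > 3), ho]
        have hlen : (w2.reverse ++ "#" :: q.reverse).length - (q.length - 3)
            = w2.reverse.length + (1 + 3) := by
          simp; omega
        rw [hlen, List.take_length_add_append]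
        have ht3 : (q.drop (q.length - 3)).reverse = q.reverse.take 3 := by
          rw [List.reverse_drop, show q.length - (q.length - 3) = 3 from by omega]
        simp [e2, ht3]
    rcases Nat.lt_trichotomy p.length 3 with hf | hf | hf
    · -- first '#' before index 3: A pads the front
      have harr1 : List.replicate (3 - p.length) "." ++ arr
          = (List.replicate (3 - p.length) "." ++ p.drop (p.length - 3)) ++ "#" :: r := by
        have e : p.length - 3 = 0 := by omega
        rw [hpr, e]; simp [List.append_assoc]
      simp only [if_pos hf, harr1]
      rw [hs2]
      simp only [Option.getD_some, ha1]
      refine hstage _ _ ?_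
      omega
    · -- first '#' exactly at index 3: A leaves the front alone
      have harr1 : arr
          = (List.replicate (3 - p.length) "." ++ p.drop (p.length - 3)) ++ "#" :: r := by
        have e : 3 - p.length = 0 := by omega
        have e2 : p.length - 3 = 0 := by omega
        rw [hpr, e, e2]; simp
      rw [if_neg (show ¬ p.length < 3 by omega), if_neg (show ¬ p.length > 3 by omega),
        if_neg (show ¬ p.length < 3 by omega), if_neg (show ¬ p.length > 3 by omega)]
      simp only [harr1]
      rw [hs2]
      simp only [Option.getD_some, ha1]
      refine hstage _ _ ?_
      omega
    · -- first '#' after index 3: A trims the front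
      have harr1 : arr.drop (p.length - 3)
          = (List.replicate (3 - p.length) "." ++ p.drop (p.length - 3)) ++ "#" :: r := by
        have e : 3 - p.length = 0 := by omega
        rw [hpr, e, List.drop_append_of_le_length (by omega)]; simp
      rw [if_neg (show ¬ p.length < 3 by omega), if_pos (show p.length > 3 by omega),
        if_neg (show ¬ p.length < 3 by omega), if_pos (show p.length > 3 by omega)]
      simp only [harr1]
      rw [hs2]
      simp only [Option.getD_some, ha1]
      refine hstage _ _ ?_
      omega
  · rw [fix_array, fix_array_alt, if_pos (by simpa using h), if_pos (by simpa using h)]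

-- ===== VERDICT (by name: the statement is the Claim_ definition above) =====
theorem fix_array_spec : Claim_equal_fix_array := by
  intro offset arr _
  exact fix_array_spec_aux offset arr
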